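-- pv_equiv track=rewrite | github.com/racerandom/JaMIE | utils.py | document_sent_mask
-- ===== SOURCE A (Python) =====
-- def document_sent_mask(sbw_toks, sep_tok='[SEP]'):
--     flip = 0
--     dsm = []
--     for t in sbw_toks:
--         dsm.append(flip)
--         if t == sep_tok:
--             flip = 1 - flip
--     assert len(sbw_toks) == len(dsm)
--     return dsm
-- ===== SOURCE B (Python) =====
-- def document_sent_mask(sbw_toks, sep_tok='[SEP]'):
--     # boundary/range-fill: collect SEP positions, then fill alternating blocks
--     bounds = [i for i, t in enumerate(sbw_toks) if t == sep_tok]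
--     dsm = []
--     parity = 0
--     prev = 0
--     for b in bounds:
--         dsm += [parity] * (b + 1 - prev)
--         prev = b + 1
--         parity = 1 - parity
--     dsm += [parity] * (len(sbw_toks) - prev)
--     return dsm
-- ===== Notes on version B (the rewrite author's own statement) =====
-- stated objective: alternative
-- what changed: Replaces the per-token mutable flip flag with a two-phase range fill: first collect the SEP token positions, then emit alternating constant blocks between consecutive boundaries.
import Mathlib
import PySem

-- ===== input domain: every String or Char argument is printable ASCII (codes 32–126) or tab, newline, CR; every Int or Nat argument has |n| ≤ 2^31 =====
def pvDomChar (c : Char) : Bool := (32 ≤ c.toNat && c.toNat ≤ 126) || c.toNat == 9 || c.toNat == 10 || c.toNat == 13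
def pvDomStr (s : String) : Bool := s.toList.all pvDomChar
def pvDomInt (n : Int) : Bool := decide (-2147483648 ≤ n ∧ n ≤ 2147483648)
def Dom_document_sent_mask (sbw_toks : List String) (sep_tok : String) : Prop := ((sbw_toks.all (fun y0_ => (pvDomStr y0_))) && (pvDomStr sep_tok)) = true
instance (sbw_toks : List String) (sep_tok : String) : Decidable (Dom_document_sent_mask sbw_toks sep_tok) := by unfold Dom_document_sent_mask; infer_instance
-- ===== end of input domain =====

-- B replaces A's per-token mutable flip flag by a two-phase range fill
-- (collect SEP positions, then emit alternating constant blocks); objective: alternative.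

-- ===== PORT A =====
-- the for-loop of A: append flip, then toggle flip when the token equals sep_tok
def maskGo : List String → String → Int → List Int
  | [], _, _ => []
  | t :: ts, sep, flip => flip :: maskGo ts sep (if t == sep then 1 - flip else flip)

def document_sent_mask (sbw_toks : List String) (sep_tok : String) : List Int :=
  maskGo sbw_toks sep_tok 0
  -- the assert len(sbw_toks) == len(dsm) always holds (one element appended per token)

-- ===== PORT B =====
-- bounds = [i for i, t in enumerate(sbw_toks) if t == sep_tok]
def sepPositions (sbw_toks : List String) (sep_tok : String) : List Int :=
  ((PySem.List.enumerate sbw_toks 0).filter (fun p => p.2 == sep_tok)).map (·.1)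

-- the for-loop over bounds plus the final block: dsm += [parity] * (b + 1 - prev)
def fillRanges : List Int → Int → Int → Int → List Int
  | [], parity, prev, n => List.replicate (n - prev).toNat parity
  | b :: bs, parity, prev, n =>
      List.replicate (b + 1 - prev).toNat parity ++ fillRanges bs (1 - parity) (b + 1) n

def document_sent_mask_alt (sbw_toks : List String) (sep_tok : String) : List Int :=
  fillRanges (sepPositions sbw_toks sep_tok) 0 0 (sbw_toks.length : Int)

-- ===== PRECONDITION & SPEC =====
def Spec_document_sent_mask (sbw_toks : List String) (sep_tok : String) (out : List Int) : Prop := out = document_sent_mask_alt sbw_toks sep_tok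
instance (sbw_toks : List String) (sep_tok : String) (out : List Int) : Decidable (Spec_document_sent_mask sbw_toks sep_tok out) := by unfold Spec_document_sent_mask; infer_instance

-- ===== CLAIM (what is proved, stated in full; the proofs are below) =====
def Claim_equal_document_sent_mask : Prop := ∀ (sbw_toks : List String) (sep_tok : String), Dom_document_sent_mask sbw_toks sep_tok → Spec_document_sent_mask sbw_toks sep_tok (document_sent_mask sbw_toks sep_tok)

-- ===== LEMMAS AND PROOFS =====

-- positions from start index s: the general form of sepPositions
def posFrom (sbw_toks : List String) (sep_tok : String) (s : Int) : List Int :=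
  ((PySem.List.enumerate sbw_toks s).filter (fun p => p.2 == sep_tok)).map (·.1)

theorem posFrom_cons (t : String) (ts : List String) (sep : String) (s : Int) :
    posFrom (t :: ts) sep s =
      (if t == sep then [s] else []) ++ posFrom ts sep (s + 1) := by
  by_cases h : t = sep <;>
    simp [posFrom, PySem.List.enumerate_cons, h]

theorem posFrom_shift (ts : List String) (sep : String) (s : Int) :
    posFrom ts sep (s + 1) = (posFrom ts sep s).map (· + 1) := by
  induction ts generalizing s with
  | nil => simp [posFrom]
  | cons t ts ih =>
      rw [posFrom_cons, posFrom_cons, ih (s + 1)]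
      by_cases h : t == sep <;> simp [h]

theorem posFrom_nonneg (ts : List String) (sep : String) (s : Int)
    (b : Int) (hb : b ∈ posFrom ts sep s) : s ≤ b := by
  induction ts generalizing s with
  | nil => simp [posFrom] at hb
  | cons t ts ih =>
      rw [posFrom_cons] at hb
      rcases List.mem_append.1 hb with h | h
      · by_cases ht : t == sep
        · rw [if_pos ht] at h; simp at h; omega
        · rw [if_neg ht] at h; simp at h
      · have := ih (s + 1) h; omega

theorem fillRanges_shift (bs : List Int) (p prev n : Int) :
    fillRanges (bs.map (· + 1)) p (prev + 1) (n + 1) = fillRanges bs p prev n := by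
  induction bs generalizing p prev with
  | nil => simp only [List.map_nil, fillRanges]; congr 1; omega
  | cons b bs ih =>
      simp only [List.map_cons, fillRanges]
      rw [show b + 1 + 1 - (prev + 1) = b + 1 - prev by ring]
      rw [show b + 1 + 1 = (b + 1) + 1 by ring, ih]

theorem fillRanges_cons (bs : List Int) (p n : Int) (hn : 0 ≤ n)
    (hbs : ∀ b ∈ bs, 0 ≤ b) :
    fillRanges (bs.map (· + 1)) p 0 (n + 1) = p :: fillRanges bs p 0 n := by
  cases bs with
  | nil =>
      simp [fillRanges]
      rw [show (n + 1).toNat = (n).toNat + 1 by omega]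
      simp [List.replicate_succ]
  | cons b bs =>
      have hb : 0 ≤ b := hbs b (List.mem_cons_self)
      simp only [List.map_cons, fillRanges]
      rw [show b + 1 + 1 = (b + 1) + 1 by ring, fillRanges_shift]
      rw [show b + 1 + 1 - 0 = (b + 1 - 0) + 1 by ring]
      rw [show (b + 1 - 0 + 1).toNat = (b + 1 - 0).toNat + 1 by omega]
      simp [List.replicate_succ]

theorem maskGo_eq_fill (ts : List String) (sep : String) (flip : Int) :
    maskGo ts sep flip = fillRanges (posFrom ts sep 0) flip 0 (ts.length : Int) := by
  induction ts generalizing flip with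
  | nil => simp [maskGo, posFrom, fillRanges]
  | cons t ts ih =>
      have hshift : posFrom (t :: ts) sep 0 =
          (if t == sep then [(0 : Int)] else []) ++ (posFrom ts sep 0).map (· + 1) := by
        have h1 := posFrom_shift ts sep 0
        norm_num at h1
        rw [posFrom_cons]
        norm_num [h1]
      have hnn : ∀ b ∈ posFrom ts sep 0, 0 ≤ b := fun b hb => posFrom_nonneg ts sep 0 b hb
      have hlen : ((t :: ts).length : Int) = (ts.length : Int) + 1 := by simp
      by_cases h : t == sep
      · simp only [maskGo, h, if_pos]
        rw [hshift, hlen]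
        simp only [h, if_pos, List.cons_append, List.nil_append, fillRanges]
        rw [show (0 : Int) + 1 - 0 = 1 from rfl]
        rw [show ((1 : Int)).toNat = 1 from rfl]
        rw [show (0 : Int) + 1 = 0 + 1 from rfl, fillRanges_shift]
        simp [List.replicate_succ, ih]
      · simp only [maskGo, h, if_neg, Bool.false_eq_true, not_false_iff]
        rw [hshift, hlen]
        simp only [h, if_false, Bool.false_eq_true, List.nil_append]
        rw [fillRanges_cons _ _ _ (by positivity) hnn, ih]

-- ===== VERDICT (by name: the statement is the Claim_ definition above) =====
theorem document_sent_mask_spec : Claim_equal_document_sent_mask := by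
  intro toks sep _
  show document_sent_mask toks sep = document_sent_mask_alt toks sep
  exact maskGo_eq_fill toks sep 0
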